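-- pv_equiv track=rewrite | github.com/hallis21/AOC24 | 21/21.py | get_all_dirpad_recursive
-- ===== SOURCE A (Python) =====
-- dir_chars = {
--     (0, 1): '>',
--     (0, -1): '<',
--     (1, 0): 'v',
--     (-1, 0): '^'
-- }
--
-- def get_paths(start, end):
--     start_x, start_y = start
--     end_x, end_y = end
--
--     # If same x or y coordinate, only one straight path is possible
--     if start_x == end_x:
--         step = 1 if end_y >= start_y else -1
--         return ([(start_x, y) for y in range(start_y, end_y + step, step)], None)
--     if start_y == end_y:
--         step = 1 if end_x >= start_x else -1
--         return ([(x, start_y) for x in range(start_x, end_x + step, step)], None)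
--
--     # Two possible paths with one turn:
--     # 1. Move horizontally first, then vertically
--     path1 = [(start_x, y) for y in range(min(start_y, end_y), max(start_y, end_y) + 1)]
--     path1 = path1 if start_y < end_y else path1[::-1]
--     vert1 = [(x, end_y) for x in range(min(start_x, end_x), max(start_x, end_x) + 1)]
--     path1 = path1[:-1] + (vert1 if start_x < end_x else vert1[::-1])
--
--     # 2. Move vertically first, then horizontally
--     path2 = [(x, start_y) for x in range(min(start_x, end_x), max(start_x, end_x) + 1)]
--     path2 = path2 if start_x < end_x else path2[::-1]
--     horz2 = [(end_x, y) for y in range(min(start_y, end_y), max(start_y, end_y) + 1)]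
--     path2 = path2[:-1] + (horz2 if start_y < end_y else horz2[::-1])
--
--     return (path1, path2)
--
-- def pick_legal_path(paths, reversed_keymap):
--     path1, path2 = paths
--     if path2 is None:
--         return path1, None
--     if path1 is None:
--         return None, path2
--     # keymape_entries = keymap.values()
--     if any(reversed_keymap.get(x) is None for x in path1):
--         return None, path2
--     if any(reversed_keymap.get(x) is None for x in path2):
--         return path1, None
--     return path1, path2
--
-- def reverse_dict(d):
--     return {v: k for k, v in d.items()}
--
-- def convert_to_directions(path):
--     directions = []
--     for i in range(1, len(path)):
--         x1, y1 = path[i-1]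
--         x2, y2 = path[i]
--         directions.append(dir_chars[(x2 - x1, y2 - y1)])
--     return directions
--
-- dirpad_coords = {
--     None: (0,0),
--     '^': (0, 1),
--     'A': (0, 2),
--     '<': (1, 0),
--     'v': (1, 1),
--     '>': (1, 2),
-- }
--
-- def get_all_dirpad_recursive(combination, cur_coord=None, path_so_far=None, index=0):
--     if cur_coord is None:
--         cur_coord = dirpad_coords['A']
--     if path_so_far is None:
--         path_so_far = []
--
--     if index >= len(combination):
--         return [path_so_far]
--
--     next_coords = dirpad_coords.get(combination[index])
--     paths = get_paths(cur_coord, next_coords)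
--     path1, path2 = pick_legal_path(paths, reverse_dict(dirpad_coords))
--
--     all_paths = []
--     for valid_path in [path1, path2]:
--         if valid_path is not None:
--             dirs = convert_to_directions(valid_path)
--             new_path = path_so_far + dirs + ['A']
--             all_paths.extend(get_all_dirpad_recursive(combination, next_coords, new_path, index + 1))
--
--
--     min_len = min(len(x) for x in all_paths)
--     all_paths = [x for x in all_paths if len(x) == min_len]
--
--     return all_paths
-- ===== SOURCE B (Python) =====
-- dirpad_key_coords = {'^': (0, 1), 'A': (0, 2), '<': (1, 0), 'v': (1, 1), '>': (1, 2)}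
--
-- def _hseg_ok(x, ya, yb):
--     # row x, columns min..max all on the keypad (gap at (0,0))
--     lo, hi = min(ya, yb), max(ya, yb)
--     return 0 <= x <= 1 and 0 <= lo and hi <= 2 and not (x == 0 and lo <= 0)
--
-- def _vseg_ok(y, xa, xb):
--     lo, hi = min(xa, xb), max(xa, xb)
--     return 0 <= lo and hi <= 1 and 0 <= y <= 2 and not (y == 0 and lo <= 0)
--
-- def _options(cur, nxt):
--     # ordered legal direction-segments for one transition, computed arithmetically
--     (x1, y1), (x2, y2) = cur, nxt
--     h = ['>' if y2 > y1 else '<'] * abs(y2 - y1)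
--     v = ['v' if x2 > x1 else '^'] * abs(x2 - x1)
--     if x1 == x2:
--         return [h + ['A']]
--     if y1 == y2:
--         return [v + ['A']]
--     if not (_hseg_ok(x1, y1, y2) and _vseg_ok(y2, x1, x2)):
--         return [v + h + ['A']]
--     if not (_vseg_ok(y1, x1, x2) and _hseg_ok(x2, y1, y2)):
--         return [h + v + ['A']]
--     return [h + v + ['A'], v + h + ['A']]
--
-- def get_all_dirpad_recursive(combination, cur_coord=None, path_so_far=None, index=0):
--     # Iterative: per-transition option segments computed in closed form (no cell
--     # lists, no recursion), then one Cartesian-product fold; the recursive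
--     # version's min-length filter is a no-op since all options have equal length.
--     if cur_coord is None:
--         cur_coord = dirpad_key_coords['A']
--     if path_so_far is None:
--         path_so_far = []
--     option_lists = []
--     cur = cur_coord
--     for i in range(index, len(combination)):
--         nxt = dirpad_key_coords[combination[i]]
--         option_lists.append(_options(cur, nxt))
--         cur = nxt
--     results = [path_so_far]
--     for opts in option_lists:
--         results = [r + seg for r in results for seg in opts]
--     return results
-- ===== Notes on version B (the rewrite author's own statement) =====
-- stated objective: faster
-- what changed: Replaces A's recursion (which builds explicit cell-lists for every candidate path, scans them against a reversed coordinate dict for legality, and re-filters all sub-results by min length at every level) with a closed-form computation: each transition's direction segments are produced arithmetically as replicated characters with an O(1) legality test, collected in one forward loop, then combined by a single Cartesian-product fold with no min-length filter (all options are provably equal length).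
import Mathlib
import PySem

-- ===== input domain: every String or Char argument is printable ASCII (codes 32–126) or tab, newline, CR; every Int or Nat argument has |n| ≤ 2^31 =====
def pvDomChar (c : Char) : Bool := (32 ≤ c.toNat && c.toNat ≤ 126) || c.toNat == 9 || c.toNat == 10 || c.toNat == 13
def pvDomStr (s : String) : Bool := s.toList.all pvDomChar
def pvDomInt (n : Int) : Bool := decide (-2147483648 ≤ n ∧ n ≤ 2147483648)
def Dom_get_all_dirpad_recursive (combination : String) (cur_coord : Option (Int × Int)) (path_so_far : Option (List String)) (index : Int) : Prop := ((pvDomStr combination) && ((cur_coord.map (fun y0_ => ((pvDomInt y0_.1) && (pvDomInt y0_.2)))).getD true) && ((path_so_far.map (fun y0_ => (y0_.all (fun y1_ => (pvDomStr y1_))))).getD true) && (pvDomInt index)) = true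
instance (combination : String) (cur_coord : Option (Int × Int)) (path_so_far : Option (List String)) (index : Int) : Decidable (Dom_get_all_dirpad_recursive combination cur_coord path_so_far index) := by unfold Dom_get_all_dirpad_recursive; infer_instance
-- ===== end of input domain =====

-- B replaces A's recursion — which builds explicit cell-lists for every candidate path,
-- scans them against a reversed coordinate dict for legality, and re-filters all
-- sub-results by min length at every level — by a closed-form computation: each
-- transition's direction segments are replicated characters with an O(1) legality test,
-- collected in one forward loop and combined by a single Cartesian-product fold
-- (the min-length filter is a no-op because all options have equal length, proved below).

-- ===== PORT A =====
-- dir_chars[(dx,dy)]; only ever applied to unit steps of generated paths, where it is exact;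
-- the KeyError branch of the Python dict lookup is unreachable there (placeholder "?").
def dirChar (d : Int × Int) : String :=
  if d = (0, 1) then ">"
  else if d = (0, -1) then "<"
  else if d = (1, 0) then "v"
  else if d = (-1, 0) then "^"
  else "?"

-- get_paths; `xs[::-1]` is List.reverse and `xs[:-1]` is List.dropLast — exact.
def get_paths (s e : Int × Int) : List (Int × Int) × Option (List (Int × Int)) :=
  if s.1 = e.1 then
    let step : Int := if e.2 ≥ s.2 then 1 else -1
    ((PySem.List.pyRange s.2 (e.2 + step) step).map (fun y => (s.1, y)), none)
  else if s.2 = e.2 then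
    let step : Int := if e.1 ≥ s.1 then 1 else -1
    ((PySem.List.pyRange s.1 (e.1 + step) step).map (fun x => (x, s.2)), none)
  else
    let p1a := (PySem.List.pyRange (min s.2 e.2) (max s.2 e.2 + 1) 1).map (fun y => (s.1, y))
    let p1b := if s.2 < e.2 then p1a else p1a.reverse
    let v1 := (PySem.List.pyRange (min s.1 e.1) (max s.1 e.1 + 1) 1).map (fun x => (x, e.2))
    let path1 := p1b.dropLast ++ (if s.1 < e.1 then v1 else v1.reverse)
    let p2a := (PySem.List.pyRange (min s.1 e.1) (max s.1 e.1 + 1) 1).map (fun x => (x, s.2))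
    let p2b := if s.1 < e.1 then p2a else p2a.reverse
    let h2 := (PySem.List.pyRange (min s.2 e.2) (max s.2 e.2 + 1) 1).map (fun y => (e.1, y))
    (path1, some (p2b.dropLast ++ (if s.2 < e.2 then h2 else h2.reverse)))

-- `reversed_keymap.get(x) is None`: true when x is missing OR stored with value None
def keyIsNone (rk : PySem.Dict (Int × Int) (Option Char)) (x : Int × Int) : Bool :=
  match rk.get? x with
  | some (some _) => false
  | _ => true

-- pick_legal_path; the Python `if path1 is None` branch cannot fire (get_paths always
-- returns a list first) and has no counterpart in the List × Option List typing.
def pick_legal_path (paths : List (Int × Int) × Option (List (Int × Int)))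
    (rk : PySem.Dict (Int × Int) (Option Char)) :
    Option (List (Int × Int)) × Option (List (Int × Int)) :=
  match paths with
  | (path1, none) => (some path1, none)
  | (path1, some path2) =>
    if path1.any (keyIsNone rk) then (none, some path2)
    else if path2.any (keyIsNone rk) then (some path1, none)
    else (some path1, some path2)

-- reverse_dict: {v: k for k, v in d.items()} (later duplicates overwrite, as in Python)
def reverse_dict {K V : Type} [BEq K] [BEq V] (d : PySem.Dict K V) : PySem.Dict V K :=
  d.items.foldl (fun acc kv => acc.insert kv.2 kv.1) (PySem.Dict.mk [])

-- convert_to_directions: direction char of each consecutive pair, in order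
def convert_to_directions : List (Int × Int) → List String
  | p1 :: p2 :: rest => dirChar (p2.1 - p1.1, p2.2 - p1.2) :: convert_to_directions (p2 :: rest)
  | _ => []

-- min_len = min(len(x) for x in all_paths); [x for x in all_paths if len(x) == min_len]
-- (none = min() of an empty sequence: ValueError; unreachable, a path is always kept)
def pyMinFilter (all_paths : List (List String)) : List (List String) :=
  match PySem.List.min? (all_paths.map (fun x => (x.length : Int))) (fun v => v) with
  | none => []
  | some m => all_paths.filter (fun x => (x.length : Int) == m)

-- dirpad_coords (key None modelled as `none`, char keys as `some c`)
def dirpadCoords : PySem.Dict (Option Char) (Int × Int) :=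
  PySem.Dict.ofList [(none, (0, 0)), (some '^', (0, 1)), (some 'A', (0, 2)),
                     (some '<', (1, 0)), (some 'v', (1, 1)), (some '>', (1, 2))]

def get_all_dirpad_recursive (combination : String) (cur_coord : Option (Int × Int)) (path_so_far : Option (List String)) (index : Int) : List (List String) :=
  let cur := cur_coord.getD ((dirpadCoords.get? (some 'A')).getD (0, 0))  -- dirpad_coords['A']
  let psf := path_so_far.getD []
  if PySem.Str.len combination ≤ index then [psf]
  else
    match PySem.Str.pyGet? combination index with
    | none => []  -- IndexError (index < -len(combination)): excluded by Pre_
    | some c =>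
      match dirpadCoords.get? (some c) with
      | none => []  -- next_coords = None → TypeError in get_paths: excluded by Pre_
      | some nxt =>
        let pq := pick_legal_path (get_paths cur nxt) (reverse_dict dirpadCoords)
        -- `for valid_path in [path1, path2]` unrolled over the two-element literal list
        let all_paths :=
          (match pq.1 with
           | none => []
           | some vp => get_all_dirpad_recursive combination (some nxt)
               (some (psf ++ convert_to_directions vp ++ ["A"])) (index + 1)) ++
          (match pq.2 with
           | none => []
           | some vp => get_all_dirpad_recursive combination (some nxt)
               (some (psf ++ convert_to_directions vp ++ ["A"])) (index + 1))
        pyMinFilter all_paths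
termination_by (PySem.Str.len combination - index).toNat
decreasing_by all_goals (simp only [PySem.Str.len_eq] at *; omega)

-- ===== PORT B =====
-- dirpad_key_coords lookup (KeyError = none)
def coordOf (c : Char) : Option (Int × Int) :=
  if c = '^' then some (0, 1)
  else if c = 'A' then some (0, 2)
  else if c = '<' then some (1, 0)
  else if c = 'v' then some (1, 1)
  else if c = '>' then some (1, 2)
  else none

-- _hseg_ok: row x, columns min..max all on the keypad (gap at (0,0))
def hSegOk (x ya yb : Int) : Bool :=
  decide (0 ≤ x ∧ x ≤ 1 ∧ 0 ≤ min ya yb ∧ max ya yb ≤ 2 ∧ ¬(x = 0 ∧ min ya yb ≤ 0))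

-- _vseg_ok: column y, rows min..max all on the keypad
def vSegOk (y xa xb : Int) : Bool :=
  decide (0 ≤ min xa xb ∧ max xa xb ≤ 1 ∧ 0 ≤ y ∧ y ≤ 2 ∧ ¬(y = 0 ∧ min xa xb ≤ 0))

-- h = ['>' if y2 > y1 else '<'] * abs(y2 - y1)
def hChars (y1 y2 : Int) : List String :=
  List.replicate (y2 - y1).natAbs (if y2 > y1 then ">" else "<")

-- v = ['v' if x2 > x1 else '^'] * abs(x2 - x1)
def vChars (x1 x2 : Int) : List String :=
  List.replicate (x2 - x1).natAbs (if x2 > x1 then "v" else "^")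

-- _options: the ordered legal direction-segments of one transition, in closed form
def transOpts (cur nxt : Int × Int) : List (List String) :=
  let h := hChars cur.2 nxt.2
  let v := vChars cur.1 nxt.1
  if cur.1 = nxt.1 then [h ++ ["A"]]
  else if cur.2 = nxt.2 then [v ++ ["A"]]
  else if ¬(hSegOk cur.1 cur.2 nxt.2 = true ∧ vSegOk nxt.2 cur.1 nxt.1 = true) then
    [v ++ h ++ ["A"]]
  else if ¬(vSegOk cur.2 cur.1 nxt.1 = true ∧ hSegOk nxt.1 cur.2 nxt.2 = true) then
    [h ++ v ++ ["A"]]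
  else [h ++ v ++ ["A"], v ++ h ++ ["A"]]

-- one iteration of B's option-collecting loop; state = (cur, option_lists)
def optStep (combination : String) (st : (Int × Int) × List (List (List String))) (i : Int) :
    (Int × Int) × List (List (List String)) :=
  match PySem.Str.pyGet? combination i with
  | none => st  -- IndexError: excluded by Pre_
  | some c =>
    match coordOf c with
    | none => st  -- KeyError: excluded by Pre_
    | some nxt => (nxt, st.2 ++ [transOpts st.1 nxt])

-- results = [r + seg for r in results for seg in opts]
def prodStep (results : List (List String)) (opts : List (List String)) : List (List String) :=
  results.flatMap (fun r => opts.map (fun seg => r ++ seg))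

def get_all_dirpad_recursive_alt (combination : String) (cur_coord : Option (Int × Int)) (path_so_far : Option (List String)) (index : Int) : List (List String) :=
  let cur := cur_coord.getD ((coordOf 'A').getD (0, 0))
  let psf := path_so_far.getD []
  let optionLists :=
    ((PySem.List.pyRange index (PySem.Str.len combination) 1).foldl (optStep combination) (cur, [])).2
  optionLists.foldl prodStep [psf]

-- ===== PRECONDITION & SPEC =====
def okChar (c : Char) : Bool := c == '^' || c == 'A' || c == '<' || c == 'v' || c == '>'

-- Pre_ excludes exactly the inputs where Python A raises: index below -len(combination)
-- (IndexError on combination[index]) or a visited character that is no dirpad key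
-- (dirpad_coords.get returns None and get_paths raises TypeError). A negative index ≥ -len
-- wraps around and then sweeps the whole string, so all characters are visited in that case.
def Pre_get_all_dirpad_recursive (combination : String) (cur_coord : Option (Int × Int)) (path_so_far : Option (List String)) (index : Int) : Prop :=
  (PySem.Str.len combination ≤ index) ∨
  (-(PySem.Str.len combination) ≤ index ∧
    ((if index < 0 then combination.toList else combination.toList.drop index.toNat).all
      okChar) = true)
instance (combination : String) (cur_coord : Option (Int × Int)) (path_so_far : Option (List String)) (index : Int) : Decidable (Pre_get_all_dirpad_recursive combination cur_coord path_so_far index) := by unfold Pre_get_all_dirpad_recursive; infer_instance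

def pvWitness_get_all_dirpad_recursive : String × (Option (Int × Int)) × Option (List String) × Int :=
  ("<A", none, none, 0)

def Spec_get_all_dirpad_recursive (combination : String) (cur_coord : Option (Int × Int)) (path_so_far : Option (List String)) (index : Int) (out : List (List String)) : Prop := out = get_all_dirpad_recursive_alt combination cur_coord path_so_far index
instance (combination : String) (cur_coord : Option (Int × Int)) (path_so_far : Option (List String)) (index : Int) (out : List (List String)) : Decidable (Spec_get_all_dirpad_recursive combination cur_coord path_so_far index out) := by unfold Spec_get_all_dirpad_recursive; infer_instance

-- ===== CLAIM (what is proved, stated in full; the proofs are below) =====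
def Claim_equal_get_all_dirpad_recursive : Prop := ∀ (combination : String) (cur_coord : Option (Int × Int)) (path_so_far : Option (List String)) (index : Int), Dom_get_all_dirpad_recursive combination cur_coord path_so_far index → Pre_get_all_dirpad_recursive combination cur_coord path_so_far index → Spec_get_all_dirpad_recursive combination cur_coord path_so_far index (get_all_dirpad_recursive combination cur_coord path_so_far index)

-- ===== LEMMAS AND PROOFS =====

-- ---- generic straight-run machinery (proof-side only) ----
def run (p d : Int × Int) : Nat → List (Int × Int)
  | 0 => [p]
  | n + 1 => p :: run (p.1 + d.1, p.2 + d.2) d n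

theorem run_head? (p d : Int × Int) (n : Nat) : (run p d n).head? = some p := by
  cases n <;> simp [run]

theorem run_cons_eq (p d : Int × Int) (n : Nat) :
    run p d (n + 1) = p :: run (p.1 + d.1, p.2 + d.2) d n := rfl

theorem run_succ_right (p d : Int × Int) (n : Nat) :
    run p d (n + 1) = run p d n ++ [(p.1 + d.1 * (n + 1), p.2 + d.2 * (n + 1))] := by
  induction n generalizing p with
  | zero => simp [run, mul_one]
  | succ n ih =>
    rw [run_cons_eq, ih (p.1 + d.1, p.2 + d.2), run_cons_eq, List.cons_append]
    congr 1
    congr 1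
    congr 1
    simp only [Prod.mk.injEq]
    constructor <;> (push_cast; ring)

theorem run_getLast? (p d : Int × Int) (n : Nat) :
    (run p d n).getLast? = some (p.1 + d.1 * n, p.2 + d.2 * n) := by
  cases n with
  | zero => simp [run]
  | succ n =>
    rw [run_succ_right, List.getLast?_concat]
    simp only [Option.some.injEq, Prod.mk.injEq]
    constructor <;> (push_cast; ring)

theorem run_reverse (p d : Int × Int) (n : Nat) :
    (run p d n).reverse = run (p.1 + d.1 * n, p.2 + d.2 * n) (-d.1, -d.2) n := by
  induction n generalizing p with
  | zero => simp [run]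
  | succ n ih =>
    rw [run_succ_right, List.reverse_append, List.reverse_singleton, ih, run_cons_eq,
      List.singleton_append]
    congr 1
    congr 1
    simp only [Prod.mk.injEq]
    constructor <;> (push_cast; ring)

theorem convert_cons_run (a p d : Int × Int) (n : Nat) :
    convert_to_directions (a :: run p d n) =
      dirChar (p.1 - a.1, p.2 - a.2) :: convert_to_directions (run p d n) := by
  cases n <;> rfl

theorem conv_run (p d : Int × Int) (n : Nat) :
    convert_to_directions (run p d n) = List.replicate n (dirChar d) := by
  induction n generalizing p with
  | zero => simp [run, convert_to_directions]
  | succ n ih =>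
    rw [run_cons_eq, convert_cons_run, ih]
    simp [List.replicate_succ]

theorem run_any (p d : Int × Int) (n : Nat) (q : Int × Int → Bool) :
    (run p d n).any q = true ↔
      ∃ k : Nat, k ≤ n ∧ q (p.1 + d.1 * k, p.2 + d.2 * k) = true := by
  induction n generalizing p with
  | zero =>
    simp only [run, List.any_cons, List.any_nil, Bool.or_false]
    constructor
    · intro h; exact ⟨0, le_refl _, by simpa using h⟩
    · rintro ⟨k, hk, h⟩
      have hk0 : k = 0 := Nat.le_zero.mp hk
      subst hk0; simpa using h
  | succ n ih =>
    rw [run_cons_eq]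
    simp only [List.any_cons, Bool.or_eq_true, ih]
    constructor
    · rintro (h | ⟨k, hk, h⟩)
      · exact ⟨0, Nat.zero_le _, by simpa using h⟩
      · refine ⟨k + 1, by omega, ?_⟩
        convert h using 3 <;> push_cast <;> ring
    · rintro ⟨k, hk, h⟩
      cases k with
      | zero => exact Or.inl (by simpa using h)
      | succ k =>
        refine Or.inr ⟨k, by omega, ?_⟩
        convert h using 3 <;> push_cast <;> ring

-- ---- pyRange ↔ run bridges ----
theorem mapH_up (x a b : Int) (h : a ≤ b) :
    (PySem.List.pyRange a (b + 1) 1).map (fun y => (x, y)) = run (x, a) (0, 1) (b - a).toNat := by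
  obtain ⟨n, hn⟩ : ∃ n : Nat, (b - a).toNat = n := ⟨_, rfl⟩
  rw [hn]
  induction n generalizing a with
  | zero =>
    have hab : b = a := by omega
    subst hab
    rw [PySem.List.pyRange_one_singleton]
    simp [run]
  | succ n ih =>
    rw [PySem.List.pyRange_one_cons (by omega : a < b + 1)]
    simp only [List.map_cons]
    rw [ih (a + 1) (by omega) (by omega), run_cons_eq]
    norm_num

theorem mapH_down (x a b : Int) (h : b ≤ a) :
    (PySem.List.pyRange a (b - 1) (-1)).map (fun y => (x, y)) = run (x, a) (0, -1) (a - b).toNat := by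
  obtain ⟨n, hn⟩ : ∃ n : Nat, (a - b).toNat = n := ⟨_, rfl⟩
  rw [hn]
  induction n generalizing a with
  | zero =>
    have hab : a = b := by omega
    subst hab
    rw [PySem.List.pyRange_neg_one_cons (by omega), PySem.List.pyRange_neg_one_eq_nil (by omega)]
    simp [run]
  | succ n ih =>
    rw [PySem.List.pyRange_neg_one_cons (by omega : b - 1 < a)]
    simp only [List.map_cons]
    rw [ih (a - 1) (by omega) (by omega), run_cons_eq]
    rw [show (a : Int) + -1 = a - 1 from by ring]
    norm_num

theorem mapV_up (y a b : Int) (h : a ≤ b) :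
    (PySem.List.pyRange a (b + 1) 1).map (fun v => (v, y)) = run (a, y) (1, 0) (b - a).toNat := by
  obtain ⟨n, hn⟩ : ∃ n : Nat, (b - a).toNat = n := ⟨_, rfl⟩
  rw [hn]
  induction n generalizing a with
  | zero =>
    have hab : b = a := by omega
    subst hab
    rw [PySem.List.pyRange_one_singleton]
    simp [run]
  | succ n ih =>
    rw [PySem.List.pyRange_one_cons (by omega : a < b + 1)]
    simp only [List.map_cons]
    rw [ih (a + 1) (by omega) (by omega), run_cons_eq]
    norm_num

theorem mapV_down (y a b : Int) (h : b ≤ a) :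
    (PySem.List.pyRange a (b - 1) (-1)).map (fun v => (v, y)) = run (a, y) (-1, 0) (a - b).toNat := by
  obtain ⟨n, hn⟩ : ∃ n : Nat, (a - b).toNat = n := ⟨_, rfl⟩
  rw [hn]
  induction n generalizing a with
  | zero =>
    have hab : a = b := by omega
    subst hab
    rw [PySem.List.pyRange_neg_one_cons (by omega), PySem.List.pyRange_neg_one_eq_nil (by omega)]
    simp [run]
  | succ n ih =>
    rw [PySem.List.pyRange_neg_one_cons (by omega : b - 1 < a)]
    simp only [List.map_cons]
    rw [ih (a - 1) (by omega) (by omega), run_cons_eq]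
    rw [show (a : Int) + -1 = a - 1 from by ring]
    norm_num

-- ---- legality of a cell vs the reversed keymap ----
def legalCell (c : Int × Int) : Bool :=
  decide (0 ≤ c.1 ∧ c.1 ≤ 1 ∧ 0 ≤ c.2 ∧ c.2 ≤ 2 ∧ ¬(c.1 = 0 ∧ c.2 = 0))

theorem keyIsNone_eq (c : Int × Int) :
    keyIsNone (reverse_dict dirpadCoords) c = !legalCell c := by
  obtain ⟨a, b⟩ := c
  have hd : reverse_dict dirpadCoords =
      PySem.Dict.mk [((0, 0), none), ((0, 1), some '^'), ((0, 2), some 'A'),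
                     ((1, 0), some '<'), ((1, 1), some 'v'), ((1, 2), some '>')] := by rfl
  rw [hd]
  simp only [keyIsNone, PySem.Dict.get?_mk_cons, legalCell]
  by_cases h1 : a = 0 ∧ b = 0
  · obtain ⟨rfl, rfl⟩ := h1; rfl
  · by_cases h2 : a = 0 ∧ b = 1
    · obtain ⟨rfl, rfl⟩ := h2; rfl
    · by_cases h3 : a = 0 ∧ b = 2
      · obtain ⟨rfl, rfl⟩ := h3; rfl
      · by_cases h4 : a = 1 ∧ b = 0
        · obtain ⟨rfl, rfl⟩ := h4; rfl
        · by_cases h5 : a = 1 ∧ b = 1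
          · obtain ⟨rfl, rfl⟩ := h5; rfl
          · by_cases h6 : a = 1 ∧ b = 2
            · obtain ⟨rfl, rfl⟩ := h6; rfl
            · have e1 : (((0:Int), (0:Int)) == (a, b)) = false := by
                simp [Prod.ext_iff]; omega
              have e2 : (((0:Int), (1:Int)) == (a, b)) = false := by
                simp [Prod.ext_iff]; omega
              have e3 : (((0:Int), (2:Int)) == (a, b)) = false := by
                simp [Prod.ext_iff]; omega
              have e4 : (((1:Int), (0:Int)) == (a, b)) = false := by
                simp [Prod.ext_iff]; omega
              have e5 : (((1:Int), (1:Int)) == (a, b)) = false := by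
                simp [Prod.ext_iff]; omega
              have e6 : (((1:Int), (2:Int)) == (a, b)) = false := by
                simp [Prod.ext_iff]; omega
              rw [e1, e2, e3, e4, e5, e6]
              simp only [if_false, Bool.false_eq_true]
              have hno : ¬(0 ≤ a ∧ a ≤ 1 ∧ 0 ≤ b ∧ b ≤ 2 ∧ ¬(a = 0 ∧ b = 0)) := by omega
              simp [hno, PySem.Dict.get?]
              omega

theorem keyIsNone_fun_eq :
    (keyIsNone (reverse_dict dirpadCoords)) = fun c => !legalCell c :=
  funext keyIsNone_eq

-- the legality scan of a horizontal ascending run equals B's closed form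
theorem hRunAny (x a b : Int) :
    (run (x, min a b) (0, 1) (max a b - min a b).toNat).any (fun c => !legalCell c) =
      !hSegOk x a b := by
  cases hs : hSegOk x a b
  · simp only [Bool.not_false]
    rw [run_any]
    simp only [hSegOk, decide_eq_false_iff_not] at hs
    simp only [zero_mul, add_zero, one_mul, Bool.not_eq_true', legalCell, decide_eq_false_iff_not]
    by_cases c1 : 0 ≤ x ∧ x ≤ 1
    · by_cases c2 : 0 ≤ min a b
      · by_cases c3 : max a b ≤ 2
        · refine ⟨0, Nat.zero_le _, ?_⟩
          simp only [Nat.cast_zero, add_zero]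
          omega
        · refine ⟨(max a b - min a b).toNat, le_refl _, ?_⟩
          have hc : (((max a b - min a b).toNat : Int)) = max a b - min a b := by omega
          rw [hc]; omega
      · refine ⟨0, Nat.zero_le _, ?_⟩
        simp only [Nat.cast_zero, add_zero]; omega
    · refine ⟨0, Nat.zero_le _, ?_⟩
      simp only [Nat.cast_zero, add_zero]; omega
  · simp only [Bool.not_true]
    simp only [hSegOk, decide_eq_true_eq] at hs
    rw [Bool.eq_false_iff]
    intro hcon
    rw [run_any] at hcon
    obtain ⟨k, hk, hbad⟩ := hcon
    simp only [zero_mul, add_zero, one_mul, Bool.not_eq_true', legalCell,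
      decide_eq_false_iff_not] at hbad
    omega

theorem vRunAny (y a b : Int) :
    (run (min a b, y) (1, 0) (max a b - min a b).toNat).any (fun c => !legalCell c) =
      !vSegOk y a b := by
  cases hs : vSegOk y a b
  · simp only [Bool.not_false]
    rw [run_any]
    simp only [vSegOk, decide_eq_false_iff_not] at hs
    simp only [zero_mul, add_zero, one_mul, Bool.not_eq_true', legalCell, decide_eq_false_iff_not]
    by_cases c1 : 0 ≤ y ∧ y ≤ 2
    · by_cases c2 : 0 ≤ min a b
      · by_cases c3 : max a b ≤ 1
        · refine ⟨0, Nat.zero_le _, ?_⟩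
          simp only [Nat.cast_zero, add_zero]
          omega
        · refine ⟨(max a b - min a b).toNat, le_refl _, ?_⟩
          have hc : (((max a b - min a b).toNat : Int)) = max a b - min a b := by omega
          rw [hc]; omega
      · refine ⟨0, Nat.zero_le _, ?_⟩
        simp only [Nat.cast_zero, add_zero]; omega
    · refine ⟨0, Nat.zero_le _, ?_⟩
      simp only [Nat.cast_zero, add_zero]; omega
  · simp only [Bool.not_true]
    simp only [vSegOk, decide_eq_true_eq] at hs
    rw [Bool.eq_false_iff]
    intro hcon
    rw [run_any] at hcon
    obtain ⟨k, hk, hbad⟩ := hcon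
    simp only [zero_mul, add_zero, one_mul, Bool.not_eq_true', legalCell,
      decide_eq_false_iff_not] at hbad
    omega

-- ---- splitting a corner-joined path ----
theorem convert_mid (u : List (Int × Int)) (c : Int × Int) (v : List (Int × Int)) :
    convert_to_directions (u ++ c :: v) =
      convert_to_directions (u ++ [c]) ++ convert_to_directions (c :: v) := by
  induction u with
  | nil => simp [convert_to_directions]
  | cons a u ih =>
    cases u with
    | nil =>
      cases v with
      | nil => simp [convert_to_directions]
      | cons w v' => simp [convert_to_directions]
    | cons a' u' =>
      have h1 : convert_to_directions (a :: a' :: (u' ++ c :: v)) =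
          dirChar (a'.1 - a.1, a'.2 - a.2) :: convert_to_directions (a' :: (u' ++ c :: v)) := rfl
      have h2 : convert_to_directions (a :: a' :: (u' ++ [c])) =
          dirChar (a'.1 - a.1, a'.2 - a.2) :: convert_to_directions (a' :: (u' ++ [c])) := rfl
      simp only [List.cons_append] at *
      rw [h1, h2, ih]
      rfl

theorem conv_corner (u v : List (Int × Int)) (c : Int × Int)
    (hu : u.getLast? = some c) (hv : v.head? = some c) :
    convert_to_directions (u.dropLast ++ v) =
      convert_to_directions u ++ convert_to_directions v := by
  obtain ⟨v', rfl⟩ : ∃ v', v = c :: v' := by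
    cases v with
    | nil => simp at hv
    | cons h t =>
      simp only [List.head?_cons, Option.some.injEq] at hv
      exact ⟨t, by rw [hv]⟩
  have hune : u ≠ [] := by intro h; subst h; simp at hu
  have hlast : u.getLast hune = c := by
    rw [List.getLast?_eq_getLast hune] at hu
    simp only [Option.some.injEq] at hu
    exact hu
  have hsplit : u = u.dropLast ++ [c] := by
    conv_lhs => rw [← List.dropLast_append_getLast hune]
    rw [hlast]
  rw [convert_mid]
  congr 1
  conv_rhs => rw [hsplit]

theorem any_corner (u v : List (Int × Int)) (c : Int × Int) (q : Int × Int → Bool)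
    (hu : u.getLast? = some c) (hv : v.head? = some c) :
    (u.dropLast ++ v).any q = (u.any q || v.any q) := by
  obtain ⟨v', rfl⟩ : ∃ v', v = c :: v' := by
    cases v with
    | nil => simp at hv
    | cons h t =>
      simp only [List.head?_cons, Option.some.injEq] at hv
      exact ⟨t, by rw [hv]⟩
  have hune : u ≠ [] := by intro h; subst h; simp at hu
  have hlast : u.getLast hune = c := by
    rw [List.getLast?_eq_getLast hune] at hu
    simp only [Option.some.injEq] at hu
    exact hu
  have hsplit : u = u.dropLast ++ [c] := by
    conv_lhs => rw [← List.dropLast_append_getLast hune]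
    rw [hlast]
  conv_rhs => rw [hsplit]
  simp only [List.any_append, List.any_cons, List.any_nil, Bool.or_false]
  cases hq : q c <;> cases u.dropLast.any q <;> cases v'.any q <;> simp

-- ---- the central per-transition lemma: B's closed form = A's path machinery ----
theorem trans_correct (s e : Int × Int) :
    transOpts s e =
      (([(pick_legal_path (get_paths s e) (reverse_dict dirpadCoords)).1,
         (pick_legal_path (get_paths s e) (reverse_dict dirpadCoords)).2].filterMap id).map
         (fun p => convert_to_directions p ++ ["A"])) := by
  obtain ⟨x1, y1⟩ := s
  obtain ⟨x2, y2⟩ := e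
  by_cases h1 : x1 = x2
  · -- straight horizontal (or null) move: single path, no legality filter
    subst h1
    have hgp : get_paths (x1, y1) (x1, y2) =
        ((PySem.List.pyRange y1 (y2 + (if y2 ≥ y1 then 1 else -1)) (if y2 ≥ y1 then 1 else -1)).map
          (fun y => (x1, y)), none) := by
      simp [get_paths]
    rw [hgp, show pick_legal_path
          ((PySem.List.pyRange y1 (y2 + (if y2 ≥ y1 then 1 else -1)) (if y2 ≥ y1 then 1 else -1)).map
            (fun y => (x1, y)), none) (reverse_dict dirpadCoords) =
          (some ((PySem.List.pyRange y1 (y2 + (if y2 ≥ y1 then 1 else -1)) (if y2 ≥ y1 then 1 else -1)).map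
            (fun y => (x1, y))), none) from rfl]
    simp only [List.filterMap, id, List.map]
    have hcv : convert_to_directions
        ((PySem.List.pyRange y1 (y2 + (if y2 ≥ y1 then 1 else -1)) (if y2 ≥ y1 then 1 else -1)).map
          (fun y => (x1, y))) = hChars y1 y2 := by
      by_cases hy : y2 ≥ y1
      · rw [if_pos hy, mapH_up x1 y1 y2 hy, conv_run, hChars]
        by_cases hgt : y2 > y1
        · rw [if_pos hgt]
          have hna : (y2 - y1).natAbs = (y2 - y1).toNat := by omega
          rw [hna, show dirChar (0, 1) = ">" from rfl]
        · have hyy : y2 = y1 := by omega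
          subst hyy
          simp
      · rw [if_neg hy, show y2 + -1 = y2 - 1 from by ring,
          mapH_down x1 y1 y2 (by omega), conv_run, hChars, if_neg (by omega)]
        have hna : (y2 - y1).natAbs = (y1 - y2).toNat := by omega
        rw [hna, show dirChar (0, -1) = "<" from rfl]
    rw [hcv]
    simp [transOpts]
  · by_cases h2 : y1 = y2
    · -- straight vertical move
      subst h2
      have hgp : get_paths (x1, y1) (x2, y1) =
          ((PySem.List.pyRange x1 (x2 + (if x2 ≥ x1 then 1 else -1)) (if x2 ≥ x1 then 1 else -1)).map
            (fun x => (x, y1)), none) := by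
        simp [get_paths, h1]
      rw [hgp, show pick_legal_path
            ((PySem.List.pyRange x1 (x2 + (if x2 ≥ x1 then 1 else -1)) (if x2 ≥ x1 then 1 else -1)).map
              (fun x => (x, y1)), none) (reverse_dict dirpadCoords) =
            (some ((PySem.List.pyRange x1 (x2 + (if x2 ≥ x1 then 1 else -1)) (if x2 ≥ x1 then 1 else -1)).map
              (fun x => (x, y1))), none) from rfl]
      simp only [List.filterMap, id, List.map]
      have hcv : convert_to_directions
          ((PySem.List.pyRange x1 (x2 + (if x2 ≥ x1 then 1 else -1)) (if x2 ≥ x1 then 1 else -1)).map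
            (fun x => (x, y1))) = vChars x1 x2 := by
        by_cases hx : x2 ≥ x1
        · rw [if_pos hx, mapV_up y1 x1 x2 hx, conv_run, vChars]
          rw [if_pos (by omega : x2 > x1)]
          have hna : (x2 - x1).natAbs = (x2 - x1).toNat := by omega
          rw [hna, show dirChar (1, 0) = "v" from rfl]
        · rw [if_neg hx, show x2 + -1 = x2 - 1 from by ring,
            mapV_down y1 x1 x2 (by omega), conv_run, vChars, if_neg (by omega)]
          have hna : (x2 - x1).natAbs = (x1 - x2).toNat := by omega
          rw [hna, show dirChar (-1, 0) = "^" from rfl]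
      rw [hcv]
      simp [transOpts, h1]
    · -- two-turn case
      have hgp : get_paths (x1, y1) (x2, y2) =
          ((if y1 < y2 then (PySem.List.pyRange (min y1 y2) (max y1 y2 + 1) 1).map (fun y => (x1, y))
              else ((PySem.List.pyRange (min y1 y2) (max y1 y2 + 1) 1).map (fun y => (x1, y))).reverse).dropLast ++
            (if x1 < x2 then (PySem.List.pyRange (min x1 x2) (max x1 x2 + 1) 1).map (fun x => (x, y2))
              else ((PySem.List.pyRange (min x1 x2) (max x1 x2 + 1) 1).map (fun x => (x, y2))).reverse),
           some ((if x1 < x2 then (PySem.List.pyRange (min x1 x2) (max x1 x2 + 1) 1).map (fun x => (x, y1))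
              else ((PySem.List.pyRange (min x1 x2) (max x1 x2 + 1) 1).map (fun x => (x, y1))).reverse).dropLast ++
            (if y1 < y2 then (PySem.List.pyRange (min y1 y2) (max y1 y2 + 1) 1).map (fun y => (x2, y))
              else ((PySem.List.pyRange (min y1 y2) (max y1 y2 + 1) 1).map (fun y => (x2, y))).reverse))) := by
        simp only [get_paths, if_neg h1, if_neg h2]
      set nh : Nat := (max y1 y2 - min y1 y2).toNat with hnh
      set nv : Nat := (max x1 x2 - min x1 x2).toNat with hnv
      set eh : Int := if y1 < y2 then 1 else -1 with heh
      set ev : Int := if x1 < x2 then 1 else -1 with hev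
      -- the four oriented runs
      have hp1b : (if y1 < y2 then (PySem.List.pyRange (min y1 y2) (max y1 y2 + 1) 1).map (fun y => (x1, y))
            else ((PySem.List.pyRange (min y1 y2) (max y1 y2 + 1) 1).map (fun y => (x1, y))).reverse) =
          run (x1, y1) (0, eh) nh := by
        rw [mapH_up _ _ _ (by omega), ← hnh]
        by_cases hy : y1 < y2
        · rw [if_pos hy, heh, if_pos hy]
          congr 1
          simp only [Prod.mk.injEq, true_and, and_true]
          omega
        · rw [if_neg hy, heh, if_neg hy, run_reverse]
          congr 1
          simp only [Prod.mk.injEq, zero_mul, add_zero, one_mul, true_and, and_true]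
          omega
      have hV1 : (if x1 < x2 then (PySem.List.pyRange (min x1 x2) (max x1 x2 + 1) 1).map (fun x => (x, y2))
            else ((PySem.List.pyRange (min x1 x2) (max x1 x2 + 1) 1).map (fun x => (x, y2))).reverse) =
          run (x1, y2) (ev, 0) nv := by
        rw [mapV_up _ _ _ (by omega), ← hnv]
        by_cases hx : x1 < x2
        · rw [if_pos hx, hev, if_pos hx]
          congr 1
          simp only [Prod.mk.injEq, true_and, and_true]
          omega
        · rw [if_neg hx, hev, if_neg hx, run_reverse]
          congr 1
          simp only [Prod.mk.injEq, zero_mul, add_zero, one_mul, true_and, and_true]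
          omega
      have hp2b : (if x1 < x2 then (PySem.List.pyRange (min x1 x2) (max x1 x2 + 1) 1).map (fun x => (x, y1))
            else ((PySem.List.pyRange (min x1 x2) (max x1 x2 + 1) 1).map (fun x => (x, y1))).reverse) =
          run (x1, y1) (ev, 0) nv := by
        rw [mapV_up _ _ _ (by omega), ← hnv]
        by_cases hx : x1 < x2
        · rw [if_pos hx, hev, if_pos hx]
          congr 1
          simp only [Prod.mk.injEq, true_and, and_true]
          omega
        · rw [if_neg hx, hev, if_neg hx, run_reverse]
          congr 1
          simp only [Prod.mk.injEq, zero_mul, add_zero, one_mul, true_and, and_true]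
          omega
      have hH2 : (if y1 < y2 then (PySem.List.pyRange (min y1 y2) (max y1 y2 + 1) 1).map (fun y => (x2, y))
            else ((PySem.List.pyRange (min y1 y2) (max y1 y2 + 1) 1).map (fun y => (x2, y))).reverse) =
          run (x2, y1) (0, eh) nh := by
        rw [mapH_up _ _ _ (by omega), ← hnh]
        by_cases hy : y1 < y2
        · rw [if_pos hy, heh, if_pos hy]
          congr 1
          simp only [Prod.mk.injEq, true_and, and_true]
          omega
        · rw [if_neg hy, heh, if_neg hy, run_reverse]
          congr 1
          simp only [Prod.mk.injEq, zero_mul, add_zero, one_mul, true_and, and_true]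
          omega
      rw [hp1b, hV1, hp2b, hH2] at hgp
      -- corners
      have heh1 : y1 + eh * nh = y2 := by
        rw [heh]; by_cases hy : y1 < y2
        · rw [if_pos hy]; omega
        · rw [if_neg hy]; omega
      have hev1 : x1 + ev * nv = x2 := by
        rw [hev]; by_cases hx : x1 < x2
        · rw [if_pos hx]; omega
        · rw [if_neg hx]; omega
      have hlast1 : (run (x1, y1) (0, eh) nh).getLast? = some (x1, y2) := by
        rw [run_getLast?]; congr 2 <;> simp <;> omega
      have hhead1 : (run (x1, y2) (ev, 0) nv).head? = some (x1, y2) := run_head? _ _ _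
      have hlast2 : (run (x1, y1) (ev, 0) nv).getLast? = some (x2, y1) := by
        rw [run_getLast?]; congr 2 <;> simp <;> omega
      have hhead2 : (run (x2, y1) (0, eh) nh).head? = some (x2, y1) := run_head? _ _ _
      -- direction-segment values
      have hconvH1 : convert_to_directions (run (x1, y1) (0, eh) nh) = hChars y1 y2 := by
        rw [conv_run, hChars]
        by_cases hy : y1 < y2
        · rw [if_pos hy, heh]
          rw [if_pos hy]
          have hna : (y2 - y1).natAbs = nh := by omega
          rw [hna, show dirChar (0, 1) = ">" from rfl]
        · rw [if_neg (by omega : ¬ y2 > y1), heh, if_neg hy]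
          have hna : (y2 - y1).natAbs = nh := by omega
          rw [hna, show dirChar (0, -1) = "<" from rfl]
      have hconvH2 : convert_to_directions (run (x2, y1) (0, eh) nh) = hChars y1 y2 := by
        rw [conv_run, hChars]
        by_cases hy : y1 < y2
        · rw [if_pos hy, heh, if_pos hy]
          have hna : (y2 - y1).natAbs = nh := by omega
          rw [hna, show dirChar (0, 1) = ">" from rfl]
        · rw [if_neg (by omega : ¬ y2 > y1), heh, if_neg hy]
          have hna : (y2 - y1).natAbs = nh := by omega
          rw [hna, show dirChar (0, -1) = "<" from rfl]
      have hconvV1 : convert_to_directions (run (x1, y2) (ev, 0) nv) = vChars x1 x2 := by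
        rw [conv_run, vChars]
        by_cases hx : x1 < x2
        · rw [if_pos hx, hev, if_pos hx]
          have hna : (x2 - x1).natAbs = nv := by omega
          rw [hna, show dirChar (1, 0) = "v" from rfl]
        · rw [if_neg (by omega : ¬ x2 > x1), hev, if_neg hx]
          have hna : (x2 - x1).natAbs = nv := by omega
          rw [hna, show dirChar (-1, 0) = "^" from rfl]
      have hconvV2 : convert_to_directions (run (x1, y1) (ev, 0) nv) = vChars x1 x2 := by
        rw [conv_run, vChars]
        by_cases hx : x1 < x2
        · rw [if_pos hx, hev, if_pos hx]
          have hna : (x2 - x1).natAbs = nv := by omega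
          rw [hna, show dirChar (1, 0) = "v" from rfl]
        · rw [if_neg (by omega : ¬ x2 > x1), hev, if_neg hx]
          have hna : (x2 - x1).natAbs = nv := by omega
          rw [hna, show dirChar (-1, 0) = "^" from rfl]
      have hconvP1 : convert_to_directions
            ((run (x1, y1) (0, eh) nh).dropLast ++ run (x1, y2) (ev, 0) nv) =
          hChars y1 y2 ++ vChars x1 x2 := by
        rw [conv_corner _ _ _ hlast1 hhead1, hconvH1, hconvV1]
      have hconvP2 : convert_to_directions
            ((run (x1, y1) (ev, 0) nv).dropLast ++ run (x2, y1) (0, eh) nh) =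
          vChars x1 x2 ++ hChars y1 y2 := by
        rw [conv_corner _ _ _ hlast2 hhead2, hconvV2, hconvH2]
      -- legality scans: reduce oriented runs to ascending ones (any is reverse-invariant)
      have hanyO : ∀ (p : Int × Int) (dd : Int × Int) (m : Nat) (q : Int × Int → Bool),
          (run (p.1 + dd.1 * m, p.2 + dd.2 * m) (-dd.1, -dd.2) m).any q = (run p dd m).any q := by
        intro p dd m q
        rw [← run_reverse, List.any_reverse]
      have hanyH1 : (run (x1, y1) (0, eh) nh).any (fun c => !legalCell c) = !hSegOk x1 y1 y2 := by
        rw [← hRunAny x1 y1 y2, ← hnh]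
        by_cases hy : y1 < y2
        · congr 2
          · simp only [Prod.mk.injEq, true_and, and_true]; omega
          · rw [heh, if_pos hy]
        · have hmm : (run (x1, min y1 y2) (0, 1) nh).any (fun c => !legalCell c) =
              ((run (x1, min y1 y2) (0, 1) nh).reverse).any (fun c => !legalCell c) := by
            rw [List.any_reverse]
          rw [hmm, run_reverse]
          congr 2
          · simp only [Prod.mk.injEq, zero_mul, add_zero, one_mul, true_and, and_true]
            omega
          · rw [heh, if_neg hy]; norm_num
      have hanyV1 : (run (x1, y2) (ev, 0) nv).any (fun c => !legalCell c) = !vSegOk y2 x1 x2 := by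
        rw [← vRunAny y2 x1 x2, ← hnv]
        by_cases hx : x1 < x2
        · congr 2
          · simp only [Prod.mk.injEq, true_and, and_true]; omega
          · rw [hev, if_pos hx]
        · have hmm : (run (min x1 x2, y2) (1, 0) nv).any (fun c => !legalCell c) =
              ((run (min x1 x2, y2) (1, 0) nv).reverse).any (fun c => !legalCell c) := by
            rw [List.any_reverse]
          rw [hmm, run_reverse]
          congr 2
          · simp only [Prod.mk.injEq, zero_mul, add_zero, one_mul, true_and, and_true]
            omega
          · rw [hev, if_neg hx]; norm_num
      have hanyV2 : (run (x1, y1) (ev, 0) nv).any (fun c => !legalCell c) = !vSegOk y1 x1 x2 := by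
        rw [← vRunAny y1 x1 x2, ← hnv]
        by_cases hx : x1 < x2
        · congr 2
          · simp only [Prod.mk.injEq, true_and, and_true]; omega
          · rw [hev, if_pos hx]
        · have hmm : (run (min x1 x2, y1) (1, 0) nv).any (fun c => !legalCell c) =
              ((run (min x1 x2, y1) (1, 0) nv).reverse).any (fun c => !legalCell c) := by
            rw [List.any_reverse]
          rw [hmm, run_reverse]
          congr 2
          · simp only [Prod.mk.injEq, zero_mul, add_zero, one_mul, true_and, and_true]
            omega
          · rw [hev, if_neg hx]; norm_num
      have hanyH2 : (run (x2, y1) (0, eh) nh).any (fun c => !legalCell c) = !hSegOk x2 y1 y2 := by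
        rw [← hRunAny x2 y1 y2, ← hnh]
        by_cases hy : y1 < y2
        · congr 2
          · simp only [Prod.mk.injEq, true_and, and_true]; omega
          · rw [heh, if_pos hy]
        · have hmm : (run (x2, min y1 y2) (0, 1) nh).any (fun c => !legalCell c) =
              ((run (x2, min y1 y2) (0, 1) nh).reverse).any (fun c => !legalCell c) := by
            rw [List.any_reverse]
          rw [hmm, run_reverse]
          congr 2
          · simp only [Prod.mk.injEq, zero_mul, add_zero, one_mul, true_and, and_true]
            omega
          · rw [heh, if_neg hy]; norm_num
      have hanyP1 : ((run (x1, y1) (0, eh) nh).dropLast ++ run (x1, y2) (ev, 0) nv).any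
            (keyIsNone (reverse_dict dirpadCoords)) =
          (!hSegOk x1 y1 y2 || !vSegOk y2 x1 x2) := by
        rw [keyIsNone_fun_eq, any_corner _ _ _ _ hlast1 hhead1, hanyH1, hanyV1]
      have hanyP2 : ((run (x1, y1) (ev, 0) nv).dropLast ++ run (x2, y1) (0, eh) nh).any
            (keyIsNone (reverse_dict dirpadCoords)) =
          (!vSegOk y1 x1 x2 || !hSegOk x2 y1 y2) := by
        rw [keyIsNone_fun_eq, any_corner _ _ _ _ hlast2 hhead2, hanyV2, hanyH2]
      -- assemble
      rw [hgp]
      rw [transOpts]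
      simp only [if_neg h1, if_neg h2, pick_legal_path, hanyP1, hanyP2]
      cases hb1 : hSegOk x1 y1 y2 <;> cases hb2 : vSegOk y2 x1 x2 <;>
        cases hb3 : vSegOk y1 x1 x2 <;> cases hb4 : hSegOk x2 y1 y2 <;>
        simp [hconvP1, hconvP2, List.filterMap, id]

-- dirpad_coords char lookup = B's coordOf
theorem coordOf_eq (c : Char) : coordOf c = dirpadCoords.get? (some c) := by
  unfold coordOf
  split_ifs with h1 h2 h3 h4 h5
  · subst h1; rfl
  · subst h2; rfl
  · subst h3; rfl
  · subst h4; rfl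
  · subst h5; rfl
  · have hd : dirpadCoords =
        PySem.Dict.mk [(none, (0, 0)), (some '^', (0, 1)), (some 'A', (0, 2)),
                       (some '<', (1, 0)), (some 'v', (1, 1)), (some '>', (1, 2))] := by rfl
    rw [hd]
    simp only [PySem.Dict.get?_mk_cons]
    have e0 : ((none : Option Char) == some c) = false := by simp
    have e1 : (some '^' == some c) = false := by simp; exact fun h => h1 h.symm
    have e2 : (some 'A' == some c) = false := by simp; exact fun h => h2 h.symm
    have e3 : (some '<' == some c) = false := by simp; exact fun h => h3 h.symm
    have e4 : (some 'v' == some c) = false := by simp; exact fun h => h4 h.symm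
    have e5 : (some '>' == some c) = false := by simp; exact fun h => h5 h.symm
    rw [e0, e1, e2, e3, e4, e5]
    simp [PySem.Dict.get?]

-- ---- equal-length facts about A's two candidate paths ----
theorem convert_length : ∀ p : List (Int × Int), (convert_to_directions p).length = p.length - 1
  | [] => rfl
  | [_] => rfl
  | a :: b :: t => by
      simp [convert_to_directions, convert_length (b :: t)]

theorem get_paths_some_len (s e : Int × Int) (P Q : List (Int × Int))
    (h : get_paths s e = (P, some Q)) : P.length = Q.length := by
  unfold get_paths at h
  split_ifs at h
  all_goals simp only [Prod.mk.injEq, Option.some.injEq, reduceCtorEq, and_false] at h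
  all_goals obtain ⟨hP, hQ⟩ := h
  all_goals subst hP
  all_goals subst hQ
  all_goals simp only [List.length_append, List.length_dropLast, List.length_reverse,
    List.length_map, PySem.List.length_pyRange_one]
  all_goals omega

theorem pick_ne_nn (pr : List (Int × Int) × Option (List (Int × Int)))
    (rk : PySem.Dict (Int × Int) (Option Char)) :
    pick_legal_path pr rk ≠ (none, none) := by
  obtain ⟨p1, p2⟩ := pr
  cases p2 with
  | none => simp [pick_legal_path]
  | some p2 =>
    simp only [pick_legal_path]
    split_ifs <;> simp

theorem pick_both (pr : List (Int × Int) × Option (List (Int × Int)))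
    (rk : PySem.Dict (Int × Int) (Option Char)) (a b : List (Int × Int))
    (h : pick_legal_path pr rk = (some a, some b)) : pr = (a, some b) := by
  obtain ⟨p1, p2⟩ := pr
  cases p2 with
  | none => simp [pick_legal_path] at h
  | some p2 =>
    simp only [pick_legal_path] at h
    split_ifs at h <;> simp_all

-- the option list built for one transition: nonempty, all segments of equal length
theorem opts_good (s e : Int × Int) (rk : PySem.Dict (Int × Int) (Option Char)) :
    (([(pick_legal_path (get_paths s e) rk).1, (pick_legal_path (get_paths s e) rk).2].filterMap id).map
        (fun p => convert_to_directions p ++ ["A"])) ≠ [] ∧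
    ∀ u ∈ (([(pick_legal_path (get_paths s e) rk).1, (pick_legal_path (get_paths s e) rk).2].filterMap id).map
        (fun p => convert_to_directions p ++ ["A"])),
      ∀ v ∈ (([(pick_legal_path (get_paths s e) rk).1, (pick_legal_path (get_paths s e) rk).2].filterMap id).map
        (fun p => convert_to_directions p ++ ["A"])), u.length = v.length := by
  rcases hp : pick_legal_path (get_paths s e) rk with ⟨q1, q2⟩
  match q1, q2 with
  | none, none => exact absurd hp (pick_ne_nn _ _)
  | some a, none => simp
  | none, some b => simp
  | some a, some b =>
    have hab : a.length = b.length :=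
      get_paths_some_len s e a b (pick_both _ _ _ _ hp)
    have hc : (convert_to_directions a).length = (convert_to_directions b).length := by
      rw [convert_length, convert_length, hab]
    simp only [List.filterMap, id, List.map]
    constructor
    · simp
    · intro u hu v hv
      simp only [List.mem_cons, List.not_mem_nil, or_false] at hu hv
      rcases hu with hu | hu <;> rcases hv with hv | hv <;>
        subst hu <;> subst hv <;> simp [hc]

-- ---- B's option-collecting loop ----
theorem optStep_shift (comb : String) (i : Int) (c : Int × Int)
    (acc : List (List (List String))) :
    optStep comb (c, acc) i = ((optStep comb (c, []) i).1, acc ++ (optStep comb (c, []) i).2) := by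
  unfold optStep
  cases hg : PySem.Str.pyGet? comb i with
  | none => simp
  | some ch =>
    cases hd : coordOf ch with
    | none => simp [hd]
    | some nxt => simp [hd]

theorem foldl_optStep_acc (comb : String) (l : List Int) :
    ∀ (c : Int × Int) (acc : List (List (List String))),
      (l.foldl (optStep comb) (c, acc)).2 = acc ++ (l.foldl (optStep comb) (c, [])).2 := by
  induction l with
  | nil => simp
  | cons i t ih =>
    intro c acc
    simp only [List.foldl_cons]
    rw [optStep_shift comb i c acc]
    rw [ih ((optStep comb (c, []) i).1) (acc ++ (optStep comb (c, []) i).2),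
        ih ((optStep comb (c, []) i).1) ((optStep comb (c, []) i).2)]
    rw [List.append_assoc]

theorem optList_good (comb : String) (l : List Int) :
    ∀ c : Int × Int, ∀ o ∈ (l.foldl (optStep comb) (c, [])).2,
      o ≠ [] ∧ ∀ u ∈ o, ∀ v ∈ o, u.length = v.length := by
  induction l with
  | nil => simp
  | cons i t ih =>
    intro c o ho
    simp only [List.foldl_cons] at ho
    by_cases hstep : ∃ ch nxt, PySem.Str.pyGet? comb i = some ch ∧ coordOf ch = some nxt
    · obtain ⟨ch, nxt, hg, hcoord⟩ := hstep
      rw [show optStep comb (c, []) i = (nxt, [transOpts c nxt]) by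
            unfold optStep; simp only [hg]; simp only [hcoord]; simp] at ho
      rw [foldl_optStep_acc comb t nxt] at ho
      simp only [List.mem_append, List.mem_singleton] at ho
      rcases ho with ho | ho
      · subst ho
        rw [trans_correct]
        exact ⟨(opts_good c nxt _).1, (opts_good c nxt _).2⟩
      · exact ih nxt o ho
    · have hid : optStep comb (c, []) i = (c, []) := by
        unfold optStep
        cases hg : PySem.Str.pyGet? comb i with
        | none => rfl
        | some ch =>
          cases hcoord : coordOf ch with
          | none => simp [hcoord]
          | some nxt => exact absurd ⟨ch, nxt, hg, hcoord⟩ hstep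
      rw [hid] at ho
      exact ih c o ho

-- ---- the Cartesian-product fold ----
theorem foldl_prodStep_nil (L : List (List (List String))) :
    L.foldl prodStep [] = [] := by
  induction L with
  | nil => rfl
  | cons o t ih => simp [prodStep, ih]

theorem foldl_prodStep_append (L : List (List (List String))) :
    ∀ xs ys : List (List String),
      L.foldl prodStep (xs ++ ys) = L.foldl prodStep xs ++ L.foldl prodStep ys := by
  induction L with
  | nil => intro xs ys; rfl
  | cons o t ih =>
    intro xs ys
    simp only [List.foldl_cons]
    rw [show prodStep (xs ++ ys) o = prodStep xs o ++ prodStep ys o by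
          simp [prodStep]]
    exact ih _ _

theorem foldl_prodStep_map (L : List (List (List String))) :
    ∀ (segs : List (List String)) (p : List String),
      L.foldl prodStep (segs.map (fun seg => p ++ seg)) =
        segs.flatMap (fun seg => L.foldl prodStep [p ++ seg]) := by
  intro segs
  induction segs with
  | nil => intro p; simp [foldl_prodStep_nil]
  | cons s t ih =>
    intro p
    rw [show (s :: t).map (fun seg => p ++ seg) = [p ++ s] ++ t.map (fun seg => p ++ seg) by simp]
    rw [foldl_prodStep_append, ih p, List.flatMap_cons]

theorem foldl_prodStep_cons (opts : List (List String)) (L : List (List (List String)))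
    (p : List String) :
    (opts :: L).foldl prodStep [p] =
      opts.flatMap (fun seg => L.foldl prodStep [p ++ seg]) := by
  simp only [List.foldl_cons]
  rw [show prodStep [p] opts = opts.map (fun seg => p ++ seg) by simp [prodStep]]
  exact foldl_prodStep_map L opts p

theorem foldl_prodStep_ne_nil (L : List (List (List String)))
    (h : ∀ o ∈ L, o ≠ []) : ∀ p : List String, L.foldl prodStep [p] ≠ [] := by
  induction L with
  | nil => intro p; simp
  | cons o t ih =>
    intro p
    rw [foldl_prodStep_cons]
    obtain ⟨s, o', rfl⟩ := List.exists_cons_of_ne_nil (h o (by simp))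
    rw [List.flatMap_cons]
    have := ih (fun x hx => h x (by simp [hx])) (p ++ s)
    intro hcontra
    rw [List.append_eq_nil_iff] at hcontra
    exact this hcontra.1

theorem foldl_prodStep_len (L : List (List (List String)))
    (hL : ∀ o ∈ L, ∀ u ∈ o, ∀ v ∈ o, u.length = v.length) :
    ∀ p q : List String, p.length = q.length →
      ∀ x ∈ L.foldl prodStep [p], ∀ y ∈ L.foldl prodStep [q], x.length = y.length := by
  induction L with
  | nil =>
    intro p q hpq x hx y hy
    simp only [List.foldl_nil, List.mem_singleton] at hx hy
    subst hx; subst hy; exact hpq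
  | cons o t ih =>
    intro p q hpq x hx y hy
    rw [foldl_prodStep_cons] at hx hy
    obtain ⟨s, hs, hx⟩ := List.mem_flatMap.mp hx
    obtain ⟨s', hs', hy⟩ := List.mem_flatMap.mp hy
    have hss' : s.length = s'.length := hL o (by simp) s hs s' hs'
    exact ih (fun a ha => hL a (by simp [ha])) (p ++ s) (q ++ s')
      (by simp [hpq, hss']) x hx y hy

theorem minfilter_eq_self (xs : List (List String)) (hne : xs ≠ [])
    (hlen : ∀ x ∈ xs, ∀ y ∈ xs, x.length = y.length) : pyMinFilter xs = xs := by
  unfold pyMinFilter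
  cases hm : PySem.List.min? (xs.map (fun x => (x.length : Int))) (fun v => v) with
  | none =>
    rw [PySem.List.min?_eq_none_iff, List.map_eq_nil_iff] at hm
    exact absurd hm hne
  | some m =>
    have hmem := PySem.List.min?_mem hm
    obtain ⟨a, ha, hma⟩ := List.mem_map.mp hmem
    apply List.filter_eq_self.mpr
    intro x hx
    have hxa : x.length = a.length := hlen x hx a ha
    simp [← hma, hxa]

-- a character fetched at an admissible index is among the visited characters
theorem pyGet?_char (comb : String) (i : Int)
    (h1 : -(PySem.Str.len comb) ≤ i) (h2 : i < PySem.Str.len comb) :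
    ∃ c, PySem.Str.pyGet? comb i = some c ∧
      c ∈ (if i < 0 then comb.toList else comb.toList.drop i.toNat) := by
  simp only [PySem.Str.len_eq] at h1 h2
  cases hg : PySem.Str.pyGet? comb i with
  | none =>
    have : PySem.List.pyGet? comb.toList i = none := by
      simpa using hg
    rw [PySem.List.pyGet?_eq_none_iff] at this
    exact absurd (by unfold PySem.Raise.InRange; omega) this
  | some c =>
    refine ⟨c, rfl, ?_⟩
    have hg' : PySem.List.pyGet? comb.toList i = some c := by simpa using hg
    by_cases hneg : i < 0
    · simp only [if_pos hneg]
      exact PySem.List.mem_of_pyGet?_eq_some _ hg'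
    · simp only [if_neg hneg]
      have h0 : 0 ≤ i := by omega
      rw [PySem.List.pyGet?_eq_some_getElem comb.toList h0 (by omega)] at hg'
      have hx : comb.toList[i.toNat]'(by omega) = c := Option.some.inj hg'
      have hdl : 0 < (comb.toList.drop i.toNat).length := by
        rw [List.length_drop]; omega
      have heq : (comb.toList.drop i.toNat)[0]'hdl = c := by
        rw [List.getElem_drop]; simpa using hx
      exact heq ▸ List.getElem_mem hdl

theorem dirpad_lookup (c : Char) (h : okChar c = true) :
    ∃ v, dirpadCoords.get? (some c) = some v := by
  unfold okChar at h
  simp only [Bool.or_eq_true, beq_iff_eq] at h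
  rcases h with ((((h | h) | h) | h) | h)
  · exact h ▸ ⟨(0, 1), by decide⟩
  · exact h ▸ ⟨(0, 2), by decide⟩
  · exact h ▸ ⟨(1, 0), by decide⟩
  · exact h ▸ ⟨(1, 1), by decide⟩
  · exact h ▸ ⟨(1, 2), by decide⟩

-- main induction: A = B whenever the recursion reaches only admissible characters
theorem A_eq_B (comb : String) :
    ∀ n (i : Int), n = (PySem.Str.len comb - i).toNat →
      -(PySem.Str.len comb) ≤ i →
      (∀ c ∈ (if i < 0 then comb.toList else comb.toList.drop i.toNat), okChar c = true) →
      ∀ (cc : Option (Int × Int)) (psf : Option (List String)),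
        get_all_dirpad_recursive comb cc psf i = get_all_dirpad_recursive_alt comb cc psf i := by
  intro n
  induction n using Nat.strong_induction_on with
  | _ n ih =>
    intro i hn hlow hok cc psf
    by_cases hlen : PySem.Str.len comb ≤ i
    · rw [get_all_dirpad_recursive]
      simp only [if_pos hlen]
      unfold get_all_dirpad_recursive_alt
      rw [PySem.List.pyRange_one_eq_nil hlen]
      simp
    · rw [not_le] at hlen
      obtain ⟨c, hc, hcmem⟩ := pyGet?_char comb i hlow hlen
      obtain ⟨nxt, hnxt⟩ := dirpad_lookup c (hok c hcmem)
      have hcoord : coordOf c = some nxt := by rw [coordOf_eq, hnxt]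
      -- the visited-characters condition at i+1
      have hok' : ∀ ch ∈ (if i + 1 < 0 then comb.toList else comb.toList.drop (i + 1).toNat),
          okChar ch = true := by
        intro ch hch
        apply hok
        by_cases h1 : i + 1 < 0
        · rw [if_pos h1] at hch
          rw [if_pos (by omega : i < 0)]
          exact hch
        · rw [if_neg h1] at hch
          by_cases h2 : i < 0
          · rw [if_pos h2]
            have h3 : (i + 1).toNat = 0 := by omega
            rw [h3, List.drop_zero] at hch
            exact hch
          · rw [if_neg h2]
            have h3 : (i + 1).toNat = i.toNat + 1 := by omega
            rw [h3] at hch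
            have h4 : comb.toList.drop (i.toNat + 1) = (comb.toList.drop i.toNat).drop 1 := by
              rw [List.drop_drop]
            rw [h4] at hch
            exact List.mem_of_mem_drop hch
      have hlow' : -(PySem.Str.len comb) ≤ i + 1 := by omega
      have hn' : ((PySem.Str.len comb - (i + 1)).toNat) < n := by
        simp only [PySem.Str.len_eq] at hn hlen ⊢; omega
      have IH := ih _ hn' (i + 1) rfl hlow' hok'
      -- abbreviations (note (coordOf 'A').getD (0,0) = (dirpadCoords.get? (some 'A')).getD (0,0))
      have hAcoord : ((coordOf 'A').getD (0, 0) : Int × Int) =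
          (dirpadCoords.get? (some 'A')).getD (0, 0) := by rfl
      set cur := cc.getD ((dirpadCoords.get? (some 'A')).getD (0, 0)) with hcur
      set psf' := psf.getD [] with hpsf
      set rkm := reverse_dict dirpadCoords with hrkm
      set rest := ((PySem.List.pyRange (i + 1) (PySem.Str.len comb) 1).foldl (optStep comb) (nxt, ([] : List (List (List String))))).2 with hrest
      -- B unfolds to a product over (opts :: rest)
      have hB : get_all_dirpad_recursive_alt comb cc psf i =
          (([(pick_legal_path (get_paths cur nxt) rkm).1,
             (pick_legal_path (get_paths cur nxt) rkm).2].filterMap id).map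
             (fun p => convert_to_directions p ++ ["A"])).flatMap
            (fun seg => rest.foldl prodStep [psf' ++ seg]) := by
        unfold get_all_dirpad_recursive_alt
        rw [hAcoord, ← hcur, PySem.List.pyRange_one_cons hlen]
        simp only [List.foldl_cons]
        rw [show optStep comb (cur, []) i = (nxt, [transOpts cur nxt]) by
              unfold optStep; simp only [hc]; simp only [hcoord]; simp]
        rw [foldl_optStep_acc]
        rw [trans_correct cur nxt, ← hrkm]
        rw [show ([(([(pick_legal_path (get_paths cur nxt) rkm).1,
                 (pick_legal_path (get_paths cur nxt) rkm).2].filterMap id).map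
                 (fun p => convert_to_directions p ++ ["A"]))] ++ rest) =
              (([(pick_legal_path (get_paths cur nxt) rkm).1,
                 (pick_legal_path (get_paths cur nxt) rkm).2].filterMap id).map
                 (fun p => convert_to_directions p ++ ["A"])) :: rest from rfl]
        exact foldl_prodStep_cons _ _ _
      -- the recursive alt calls are exactly the product over rest
      have hBrec : ∀ q : List String,
          get_all_dirpad_recursive_alt comb (some nxt) (some q) (i + 1) =
            rest.foldl prodStep [q] := by
        intro q
        rw [hrest]
        rfl
      -- facts about rest
      have hrest_good := optList_good comb (PySem.List.pyRange (i + 1) (PySem.Str.len comb) 1) nxt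
      have hrest_ne : ∀ o ∈ rest, o ≠ [] := fun o ho => (hrest_good o ho).1
      have hrest_len : ∀ o ∈ rest, ∀ u ∈ o, ∀ v ∈ o, u.length = v.length :=
        fun o ho => (hrest_good o ho).2
      -- A unfolds
      rw [get_all_dirpad_recursive]
      simp only [if_neg (by omega : ¬ PySem.Str.len comb ≤ i), hc, hnxt]
      rw [hB]
      -- case on the picked pair
      rcases hp : pick_legal_path (get_paths cur nxt) rkm with ⟨q1, q2⟩
      have hgood := opts_good cur nxt rkm
      rw [hp] at hgood
      match q1, q2 with
      | none, none => exact absurd hp (pick_ne_nn _ _)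
      | some a, none =>
        simp only [List.filterMap, id, List.map, List.flatMap_cons, List.flatMap_nil,
          List.append_nil]
        rw [IH, hBrec, ← hpsf]
        simp only [List.append_assoc]
        exact minfilter_eq_self _
          (foldl_prodStep_ne_nil rest hrest_ne _)
          (foldl_prodStep_len rest hrest_len _ _ rfl)
      | none, some b =>
        simp only [List.filterMap, id, List.map, List.flatMap_cons, List.flatMap_nil,
          List.append_nil, List.nil_append]
        rw [IH, hBrec, ← hpsf]
        simp only [List.append_assoc]
        exact minfilter_eq_self _
          (foldl_prodStep_ne_nil rest hrest_ne _)
          (foldl_prodStep_len rest hrest_len _ _ rfl)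
      | some a, some b =>
        have hab : (convert_to_directions a).length = (convert_to_directions b).length := by
          rw [convert_length, convert_length,
            get_paths_some_len cur nxt a b (pick_both _ _ _ _ hp)]
        simp only [List.filterMap, id, List.map, List.flatMap_cons, List.flatMap_nil,
          List.append_nil]
        rw [IH, IH, hBrec, hBrec, ← hpsf]
        simp only [List.append_assoc]
        apply minfilter_eq_self
        · intro hcontra
          rw [List.append_eq_nil_iff] at hcontra
          exact foldl_prodStep_ne_nil rest hrest_ne _ hcontra.1
        · intro x hx y hy
          rw [List.mem_append] at hx hy
          have key : ∀ s t : List String, s.length = t.length →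
              ∀ x' ∈ rest.foldl prodStep [psf' ++ s], ∀ y' ∈ rest.foldl prodStep [psf' ++ t],
                x'.length = y'.length := by
            intro s t hst
            exact foldl_prodStep_len rest hrest_len _ _ (by simp [hst])
          rcases hx with hx | hx <;> rcases hy with hy | hy
          · exact key _ _ rfl x hx y hy
          · exact key _ _ (by simp [hab]) x hx y hy
          · exact key _ _ (by simp [hab]) x hx y hy
          · exact key _ _ rfl x hx y hy

-- ===== VERDICT (by name: the statement is the Claim_ definition above) =====
theorem get_all_dirpad_recursive_spec : Claim_equal_get_all_dirpad_recursive := by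
  intro combination cur_coord path_so_far index _hDom hPre
  unfold Spec_get_all_dirpad_recursive
  rcases hPre with hge | ⟨hlow, hok⟩
  · apply A_eq_B combination ((PySem.Str.len combination - index).toNat) index rfl
    · simp only [PySem.Str.len_eq] at hge ⊢; omega
    · intro c hc
      have hge' := hge
      simp only [PySem.Str.len_eq] at hge'
      rw [if_neg (by omega)] at hc
      rw [List.drop_eq_nil_of_le (by omega)] at hc
      exact absurd hc (List.not_mem_nil)
  · rw [List.all_eq_true] at hok
    exact A_eq_B combination _ index rfl hlow (fun c hc => hok c hc) cur_coord path_so_far
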